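-- pv_equiv track=rewrite | github.com/kevinval04/OmniField | baselines/mia.py | get_output_dims
-- ===== SOURCE A (Python) =====
-- def get_output_dims(modes):
--     dims_out = {}
--     for mode in modes:
--         if mode in ["rgb", "curvature", "normal", "reshading", "sketch"]:
--             dims_out[mode] = 3
--         elif mode in ["depth"]:
--             dims_out[mode] = 1
--         elif mode in ["semseg"]:
--             dims_out[mode] = 19
--         else:
--             dims_out[mode] = 1
--
--     return dims_out
-- ===== SOURCE B (Python) =====
-- def get_output_dims(modes):
--     dims_out = dict.fromkeys(modes, 1)
--     for k, v in (("rgb", 3), ("curvature", 3), ("normal", 3),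
--                  ("reshading", 3), ("sketch", 3), ("semseg", 19)):
--         if k in dims_out:
--             dims_out[k] = v
--     return dims_out
-- ===== Notes on version B (the rewrite author's own statement) =====
-- stated objective: alternative
-- what changed: Instead of classifying each mode with an elif chain, B first defaults every mode to 1 via dict.fromkeys and then iterates over the constant special-mode table, overwriting the keys that are present; the per-element branching disappears and the second loop runs over the table, not the input.
import Mathlib
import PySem

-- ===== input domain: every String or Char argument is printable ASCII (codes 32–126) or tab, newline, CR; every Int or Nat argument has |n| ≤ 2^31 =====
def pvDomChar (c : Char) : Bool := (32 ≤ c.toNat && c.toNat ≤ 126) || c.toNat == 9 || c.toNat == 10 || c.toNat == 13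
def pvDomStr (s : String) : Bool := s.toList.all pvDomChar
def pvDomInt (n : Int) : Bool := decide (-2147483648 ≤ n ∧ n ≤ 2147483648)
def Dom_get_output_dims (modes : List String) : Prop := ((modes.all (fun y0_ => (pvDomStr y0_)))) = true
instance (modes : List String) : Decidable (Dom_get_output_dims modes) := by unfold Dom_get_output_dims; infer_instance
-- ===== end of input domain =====

-- B replaces A's per-element elif classification by two stages: dict.fromkeys defaults
-- every mode to 1, then a loop over the constant special-mode table overwrites present
-- keys (alternative decomposition; same cost).

-- ===== PORT A =====
def get_output_dims (modes : List String) : List (String × Int) :=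
  (modes.foldl (fun (dims_out : PySem.Dict String Int) mode =>
    if mode ∈ ["rgb", "curvature", "normal", "reshading", "sketch"] then
      dims_out.insert mode 3
    else if mode ∈ ["depth"] then
      dims_out.insert mode 1
    else if mode ∈ ["semseg"] then
      dims_out.insert mode 19
    else
      dims_out.insert mode 1) PySem.Dict.empty).items

-- ===== PORT B =====
def pvTable : List (String × Int) :=
  [("rgb", 3), ("curvature", 3), ("normal", 3), ("reshading", 3), ("sketch", 3), ("semseg", 19)]

def get_output_dims_alt (modes : List String) : List (String × Int) :=
  -- dims_out = dict.fromkeys(modes, 1)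
  let dims_out := modes.foldl (fun (d : PySem.Dict String Int) m => d.insert m 1) PySem.Dict.empty
  -- for k, v in table: if k in dims_out: dims_out[k] = v
  (pvTable.foldl (fun (d : PySem.Dict String Int) kv =>
    if d.contains kv.1 then d.insert kv.1 kv.2 else d) dims_out).items

-- ===== PRECONDITION & SPEC =====
def Spec_get_output_dims (modes : List String) (out : List (String × Int)) : Prop := out = get_output_dims_alt modes
instance (modes : List String) (out : List (String × Int)) : Decidable (Spec_get_output_dims modes out) := by unfold Spec_get_output_dims; infer_instance

-- ===== CLAIM (what is proved, stated in full; the proofs are below) =====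
def Claim_equal_get_output_dims : Prop := ∀ (modes : List String), Dom_get_output_dims modes → Spec_get_output_dims modes (get_output_dims modes)

-- ===== LEMMAS AND PROOFS =====

-- A's value per mode
def pvF (m : String) : Int :=
  if m ∈ ["rgb", "curvature", "normal", "reshading", "sketch"] then 3
  else if m ∈ ["depth"] then 1
  else if m ∈ ["semseg"] then 19
  else 1

-- A's loop body is insert m (pvF m)
theorem pv_stepA (d : PySem.Dict String Int) (m : String) :
    (if m ∈ ["rgb", "curvature", "normal", "reshading", "sketch"] then
      d.insert m 3
    else if m ∈ ["depth"] then
      d.insert m 1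
    else if m ∈ ["semseg"] then
      d.insert m 19
    else
      d.insert m 1) = d.insert m (pvF m) := by
  unfold pvF; split_ifs <;> rfl

-- a fold inserting key-determined values keeps items in the shape L.map (k ↦ (k, g k))
theorem pv_fold_ins (g : String → Int) (modes : List String) :
    ∀ (L : List String), L.Nodup →
    (modes.foldl (fun (d : PySem.Dict String Int) m => d.insert m (g m))
      (PySem.Dict.mk (L.map (fun k => (k, g k)))))
    = PySem.Dict.mk ((PySem.Set.update L modes).map (fun k => (k, g k))) := by
  induction modes with
  | nil => intro L _; simp [PySem.Set.update]
  | cons m ms ih =>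
    intro L hL
    have hkeys : (PySem.Dict.mk (L.map (fun k => (k, g k)))).keys = L := by
      simp [PySem.Dict.keys_mk, List.map_map, Function.comp_def]
    have hins : (PySem.Dict.mk (L.map (fun k => (k, g k)))).insert m (g m)
        = PySem.Dict.mk ((PySem.Set.add L m).map (fun k => (k, g k))) := by
      apply PySem.Dict.ext
      by_cases hm : m ∈ L
      · have hc : (PySem.Dict.mk (L.map (fun k => (k, g k)))).contains m = true := by
          rw [PySem.Dict.contains_eq_decide_mem_keys, hkeys]; simpa
        rw [PySem.Dict.items_insert_of_contains _ _ hc]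
        have : PySem.Set.add L m = L := by simp [PySem.Set.add, PySem.Set.contains, hm]
        rw [this]
        simp only [List.map_map]
        apply List.map_congr_left
        intro k _
        by_cases hk : k = m
        · subst hk; simp
        · simp [Function.comp, hk]
      · have hc : (PySem.Dict.mk (L.map (fun k => (k, g k)))).contains m = false := by
          rw [PySem.Dict.contains_eq_decide_mem_keys, hkeys]; simpa
        rw [PySem.Dict.items_insert_of_not_contains _ _ hc]
        have : PySem.Set.add L m = L ++ [m] := by simp [PySem.Set.add, PySem.Set.contains, hm]
        rw [this]; simp
    have hN : (PySem.Set.add L m).Nodup := by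
      by_cases hm : m ∈ L
      · simpa [PySem.Set.add, PySem.Set.contains, hm] using hL
      · rw [show PySem.Set.add L m = L ++ [m] from by
            simp [PySem.Set.add, PySem.Set.contains, hm], List.nodup_append]
        refine ⟨hL, List.nodup_singleton m, ?_⟩
        intro a ha b hb
        have hbm : b = m := List.mem_singleton.mp hb
        subst hbm
        exact fun h => hm (h ▸ ha)
    rw [List.foldl_cons, hins, ih _ hN]
    simp [PySem.Set.update, List.foldl_cons]

-- the conditional-overwrite loop over a table rewrites the value function pointwise
theorem pv_fold_cond (tbl : List (String × Int)) :
    ∀ (L : List String) (g : String → Int), L.Nodup →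
    (tbl.foldl (fun (d : PySem.Dict String Int) kv =>
        if d.contains kv.1 then d.insert kv.1 kv.2 else d)
      (PySem.Dict.mk (L.map (fun k => (k, g k)))))
    = PySem.Dict.mk (L.map (fun k =>
        (k, tbl.foldl (fun acc kv => if k = kv.1 then kv.2 else acc) (g k)))) := by
  induction tbl with
  | nil => intro L g _; rfl
  | cons kv tl ih =>
    intro L g hL
    have hkeys : (PySem.Dict.mk (L.map (fun k => (k, g k)))).keys = L := by
      simp [PySem.Dict.keys_mk, List.map_map, Function.comp_def]
    have hstep : (if (PySem.Dict.mk (L.map (fun k => (k, g k)))).contains kv.1 then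
          (PySem.Dict.mk (L.map (fun k => (k, g k)))).insert kv.1 kv.2
        else PySem.Dict.mk (L.map (fun k => (k, g k))))
        = PySem.Dict.mk (L.map (fun k => (k, if k = kv.1 then kv.2 else g k))) := by
      by_cases hm : kv.1 ∈ L
      · have hc : (PySem.Dict.mk (L.map (fun k => (k, g k)))).contains kv.1 = true := by
          rw [PySem.Dict.contains_eq_decide_mem_keys, hkeys]; simpa
        rw [if_pos hc]
        apply PySem.Dict.ext
        rw [PySem.Dict.items_insert_of_contains _ _ hc]
        simp only [List.map_map]
        apply List.map_congr_left
        intro k _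
        by_cases hk : k = kv.1
        · subst hk; simp
        · simp [Function.comp, hk]
      · have hc : (PySem.Dict.mk (L.map (fun k => (k, g k)))).contains kv.1 = false := by
          rw [PySem.Dict.contains_eq_decide_mem_keys, hkeys]; simpa
        rw [if_neg (by simp [hc])]
        congr 1
        apply List.map_congr_left
        intro k hk
        have : k ≠ kv.1 := fun h => hm (h ▸ hk)
        simp [this]
    rw [List.foldl_cons, hstep, ih _ _ hL]
    simp [List.foldl_cons]

-- A's pvF equals B's table fold, pointwise
theorem pv_val_eq (k : String) :
    pvF k = pvTable.foldl (fun acc kv => if k = kv.1 then kv.2 else acc) 1 := by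
  unfold pvF pvTable
  simp only [List.foldl_cons, List.foldl_nil]
  by_cases h1 : k = "rgb"
  · subst h1; decide
  by_cases h2 : k = "curvature"
  · subst h2; decide
  by_cases h3 : k = "normal"
  · subst h3; decide
  by_cases h4 : k = "reshading"
  · subst h4; decide
  by_cases h5 : k = "sketch"
  · subst h5; decide
  by_cases h6 : k = "semseg"
  · subst h6; decide
  by_cases h7 : k = "depth"
  · subst h7; decide
  · simp [h1, h2, h3, h4, h5, h6, h7]

-- ===== VERDICT (by name: the statement is the Claim_ definition above) =====
theorem get_output_dims_spec : Claim_equal_get_output_dims := by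
  intro modes _
  unfold Spec_get_output_dims get_output_dims get_output_dims_alt
  have hA : modes.foldl (fun (dims_out : PySem.Dict String Int) mode =>
      if mode ∈ ["rgb", "curvature", "normal", "reshading", "sketch"] then
        dims_out.insert mode 3
      else if mode ∈ ["depth"] then dims_out.insert mode 1
      else if mode ∈ ["semseg"] then dims_out.insert mode 19
      else dims_out.insert mode 1) PySem.Dict.empty
      = modes.foldl (fun (d : PySem.Dict String Int) m => d.insert m (pvF m)) PySem.Dict.empty := by
    apply PySem.List.foldl_congr_mem
    intro d m _; exact pv_stepA d m
  rw [hA]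
  have hAfold := pv_fold_ins pvF modes [] List.nodup_nil
  have hBfold := pv_fold_ins (fun _ => (1 : Int)) modes [] List.nodup_nil
  simp only [List.map_nil] at hAfold hBfold
  have hset : (PySem.Set.update ([] : List String) modes).Nodup := by
    have := PySem.Set.nodup_ofList modes
    simpa [PySem.Set.ofList, PySem.Set.update] using this
  show (List.foldl (fun (d : PySem.Dict String Int) m => d.insert m (pvF m)) (PySem.Dict.mk []) modes).items
      = (List.foldl (fun (d : PySem.Dict String Int) kv =>
            if d.contains kv.1 then d.insert kv.1 kv.2 else d)
          (List.foldl (fun (d : PySem.Dict String Int) m => d.insert m 1) (PySem.Dict.mk []) modes) pvTable).items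
  rw [hAfold, hBfold, pv_fold_cond pvTable _ (fun _ => (1 : Int)) hset]
  apply List.map_congr_left
  intro k _
  exact congrArg _ (pv_val_eq k)
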